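-- pv_equiv track=rewrite | github.com/hithyi02011/Sie | app.py | compute_label_positions
-- ===== SOURCE A (Python) =====
-- def compute_label_positions(people, coords, base_offset=58, near_x_threshold=115):
--     """
--     标签更贴近图形底部（按你的要求）
--     同层太近时轻微错位，避免重叠
--     """
--     rows = {}
--     for p in people:
--         pid = p["id"]
--         if pid not in coords:
--             continue
--         x, y = coords[pid]
--         rows.setdefault(round(y), []).append((pid, x, y))
--
--     label_pos = {}
--     for _row_y, items in rows.items():
--         items.sort(key=lambda t: t[1])
--         cluster = []
--         clusters = []
--
--         for item in items:
--             if not cluster: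
--                 cluster = [item]
--             else:
--                 prev = cluster[-1]
--                 if abs(item[1] - prev[1]) < near_x_threshold:
--                     cluster.append(item)
--                 else:
--                     clusters.append(cluster)
--                     cluster = [item]
--         if cluster:
--             clusters.append(cluster)
--
--         for cl in clusters:
--             for i, (pid, x, y) in enumerate(cl):
--                 extra = 0
--                 if len(cl) > 1:
--                     # 轻微错位，不要太夸张
--                     pattern = [0, 14, 26, 14, 26, 38]
--                     extra = pattern[i] if i < len(pattern) else 14 * (i % 3)
--                 label_pos[pid] = (x, y + base_offset + extra)
--
--     return label_pos
-- ===== SOURCE B (Python) =====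
-- def compute_label_positions(people, coords, base_offset=58, near_x_threshold=115):
--     pts = []
--     for p in people:
--         pid = p["id"]
--         if pid in coords:
--             x, y = coords[pid]
--             pts.append((pid, x, y))
--
--     rows = {}
--     for pid, x, y in pts:
--         rows.setdefault(round(y), []).append((pid, x, y))
--
--     label_pos = {}
--     for items in rows.values():
--         for cl in _clusters(sorted(items, key=lambda t: t[1]), near_x_threshold):
--             n = len(cl)
--             for i, (pid, x, y) in enumerate(cl):
--                 label_pos[pid] = (x, y + base_offset + _extra(i, n))
--     return label_pos
--
--
-- def _extra(i, n):
--     if n == 1: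
--         return 0
--     pattern = (0, 14, 26, 14, 26, 38)
--     return pattern[i] if i < len(pattern) else 14 * (i % 3)
--
--
-- def _clusters(items, thr):
--     if not items:
--         return []
--     run, rest = _take_run(items[0], items[1:], thr)
--     return [[items[0]] + run] + _clusters(rest, thr)
--
--
-- def _take_run(prev, items, thr):
--     if items and abs(items[0][1] - prev[1]) < thr:
--         run, rest = _take_run(items[0], items[1:], thr)
--         return [items[0]] + run, rest
--     return [], items
-- ===== Notes on version B (the rewrite author's own statement) =====
-- stated objective: alternative
-- what changed: A's stateful cluster/clusters accumulator loop with trailing flush is replaced by a prepass collecting placed points plus a recursive run-splitting clustering (_clusters/_take_run) and an explicit per-index offset function; iteration goes over rows.values instead of items.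
import Mathlib
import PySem

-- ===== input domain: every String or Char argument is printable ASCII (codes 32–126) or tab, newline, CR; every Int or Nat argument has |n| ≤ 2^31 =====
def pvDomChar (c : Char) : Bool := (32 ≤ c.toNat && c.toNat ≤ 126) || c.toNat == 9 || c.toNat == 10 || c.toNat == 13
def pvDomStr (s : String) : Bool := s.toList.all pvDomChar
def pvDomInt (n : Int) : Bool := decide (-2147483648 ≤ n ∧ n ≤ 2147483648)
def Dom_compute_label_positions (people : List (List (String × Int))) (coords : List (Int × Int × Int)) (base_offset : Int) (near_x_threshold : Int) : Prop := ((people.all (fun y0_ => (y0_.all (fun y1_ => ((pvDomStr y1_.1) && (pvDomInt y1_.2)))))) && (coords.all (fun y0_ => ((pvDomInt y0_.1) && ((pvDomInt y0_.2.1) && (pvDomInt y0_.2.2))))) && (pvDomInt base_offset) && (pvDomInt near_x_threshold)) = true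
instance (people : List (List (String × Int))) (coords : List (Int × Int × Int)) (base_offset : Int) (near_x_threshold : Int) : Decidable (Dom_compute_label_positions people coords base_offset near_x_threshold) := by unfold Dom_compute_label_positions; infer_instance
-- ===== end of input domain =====

-- B replaces A's accumulator-state cluster loop by a recursive run-splitting decomposition
-- (a prepass collecting the placed points, then _clusters/_take_run and a per-index offset
-- helper); objective: alternative decomposition, same cost.

-- ===== PORT A =====

-- one step of A's cluster-building loop over a sorted row: state = (cluster, clusters)
def aClusterStep (thr : Int)
    (st : List (Int × Int × Int) × List (List (Int × Int × Int))) (item : Int × Int × Int) :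
    List (Int × Int × Int) × List (List (Int × Int × Int)) :=
  let cluster := st.1
  let clusters := st.2
  if cluster.isEmpty then (([item] : List (Int × Int × Int)), clusters)
  else
    match PySem.List.pyGet? cluster (-1) with   -- prev = cluster[-1]; cluster nonempty here
    | none => ([item], clusters)                -- unreachable
    | some prev =>
      if |item.2.1 - prev.2.1| < thr then (cluster ++ [item], clusters)
      else ([item], clusters ++ [cluster])

-- A's per-row clustering: the loop, then 'if cluster: clusters.append(cluster)'
def aRowClusters (thr : Int) (items : List (Int × Int × Int)) :
    List (List (Int × Int × Int)) :=
  let st := items.foldl (aClusterStep thr) ([], [])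
  if st.1.isEmpty then st.2 else st.2 ++ [st.1]

-- A's placement loop over one cluster, extra computed inline
def aPlace (base_offset : Int) (lp : PySem.Dict Int (Int × Int))
    (cl : List (Int × Int × Int)) : PySem.Dict Int (Int × Int) :=
  (PySem.List.enumerate cl).foldl
    (fun lp e =>
      let i := e.1
      let pid := e.2.1
      let x := e.2.2.1
      let y := e.2.2.2
      let extra : Int :=
        if 1 < (cl.length : Int) then
          if i < 6 then (PySem.List.pyGet? ([0, 14, 26, 14, 26, 38] : List Int) i).getD 0
          else 14 * PySem.Int.mod i 3
        else 0
      lp.insert pid (x, y + base_offset + extra)) lp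

def compute_label_positions (people : List (List (String × Int))) (coords : List (Int × Int × Int)) (base_offset : Int) (near_x_threshold : Int) : List (Int × Int × Int) :=
  let rows : PySem.Dict Int (List (Int × Int × Int)) :=
    people.foldl (fun rows p =>
      match (PySem.Dict.mk p).get? "id" with   -- p["id"]; none = KeyError, excluded by Pre_
      | none => rows
      | some pid =>
        if (PySem.Dict.mk coords).contains pid then
          match (PySem.Dict.mk coords).get? pid with
          | some xy => rows.modify xy.2 [] (· ++ [(pid, xy.1, xy.2)])  -- setdefault(round(y),[]).append
          | none => rows                       -- unreachable: contains holds
        else rows) PySem.Dict.empty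
  let label_pos : PySem.Dict Int (Int × Int) :=
    rows.items.foldl (fun lp row =>
      let items := PySem.List.sorted row.2 (fun t => t.2.1) false
      (aRowClusters near_x_threshold items).foldl (aPlace base_offset) lp) PySem.Dict.empty
  label_pos.items

-- ===== PORT B =====

-- _take_run: longest prefix staying within thr of its predecessor, plus the rest
def bTakeRun (thr : Int) (prev : Int × Int × Int) :
    List (Int × Int × Int) → List (Int × Int × Int) × List (Int × Int × Int)
  | [] => ([], [])
  | h :: t =>
    if |h.2.1 - prev.2.1| < thr then
      let r := bTakeRun thr h t
      (h :: r.1, r.2)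
    else ([], h :: t)

theorem bTakeRun_rest_length_le (thr : Int) (prev : Int × Int × Int)
    (l : List (Int × Int × Int)) : (bTakeRun thr prev l).2.length ≤ l.length := by
  induction l generalizing prev with
  | nil => simp [bTakeRun]
  | cons h t ih =>
    simp only [bTakeRun]
    split
    · exact Nat.le_succ_of_le (ih h)
    · simp

-- _clusters: recursive run splitting
def bClusters (thr : Int) : List (Int × Int × Int) → List (List (Int × Int × Int))
  | [] => []
  | h :: t =>
    let r := bTakeRun thr h t
    (h :: r.1) :: bClusters thr r.2
termination_by l => l.length
decreasing_by
  exact Nat.lt_succ_of_le (bTakeRun_rest_length_le thr h t)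

-- _extra(i, n)
def bExtra (i n : Int) : Int :=
  if n = 1 then 0
  else if i < 6 then (PySem.List.pyGet? ([0, 14, 26, 14, 26, 38] : List Int) i).getD 0
  else 14 * PySem.Int.mod i 3

def compute_label_positions_alt (people : List (List (String × Int))) (coords : List (Int × Int × Int)) (base_offset : Int) (near_x_threshold : Int) : List (Int × Int × Int) :=
  let pts : List (Int × Int × Int) :=
    people.foldl (fun pts p =>
      match (PySem.Dict.mk p).get? "id" with   -- p["id"]; none = KeyError, excluded by Pre_
      | none => pts
      | some pid =>
        if (PySem.Dict.mk coords).contains pid then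
          match (PySem.Dict.mk coords).get? pid with
          | some xy => pts ++ [(pid, xy.1, xy.2)]
          | none => pts                        -- unreachable: contains holds
        else pts) []
  let rows : PySem.Dict Int (List (Int × Int × Int)) :=
    pts.foldl (fun rows q => rows.modify q.2.2 [] (· ++ [q])) PySem.Dict.empty
  let label_pos : PySem.Dict Int (Int × Int) :=
    rows.values.foldl (fun lp items =>
      (bClusters near_x_threshold (PySem.List.sorted items (fun t => t.2.1) false)).foldl
        (fun lp cl =>
          let n : Int := cl.length
          (PySem.List.enumerate cl).foldl
            (fun lp e =>
              lp.insert e.2.1 (e.2.2.1, e.2.2.2 + base_offset + bExtra e.1 n)) lp) lp)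
      PySem.Dict.empty
  label_pos.items

-- ===== PRECONDITION & SPEC =====
-- Pre_ excludes exactly the inputs where A raises KeyError: some person dict lacks the key "id".
def Pre_compute_label_positions (people : List (List (String × Int))) (coords : List (Int × Int × Int)) (base_offset : Int) (near_x_threshold : Int) : Prop :=
  ∀ p ∈ people, "id" ∈ p.map Prod.fst
instance (people : List (List (String × Int))) (coords : List (Int × Int × Int)) (base_offset : Int) (near_x_threshold : Int) : Decidable (Pre_compute_label_positions people coords base_offset near_x_threshold) := by unfold Pre_compute_label_positions; infer_instance

def pvWitness_compute_label_positions : (List (List (String × Int))) × (List (Int × Int × Int)) × Int × Int :=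
  ([[("id", 1)], [("id", 2)], [("id", 3)]], [(1, 10, 0), (2, 40, 0), (3, 400, 0)], 58, 115)

def Spec_compute_label_positions (people : List (List (String × Int))) (coords : List (Int × Int × Int)) (base_offset : Int) (near_x_threshold : Int) (out : List (Int × Int × Int)) : Prop := out = compute_label_positions_alt people coords base_offset near_x_threshold
instance (people : List (List (String × Int))) (coords : List (Int × Int × Int)) (base_offset : Int) (near_x_threshold : Int) (out : List (Int × Int × Int)) : Decidable (Spec_compute_label_positions people coords base_offset near_x_threshold out) := by unfold Spec_compute_label_positions; infer_instance

-- ===== CLAIM (what is proved, stated in full; the proofs are below) =====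
def Claim_equal_compute_label_positions : Prop := ∀ (people : List (List (String × Int))) (coords : List (Int × Int × Int)) (base_offset : Int) (near_x_threshold : Int), Dom_compute_label_positions people coords base_offset near_x_threshold → Pre_compute_label_positions people coords base_offset near_x_threshold → Spec_compute_label_positions people coords base_offset near_x_threshold (compute_label_positions people coords base_offset near_x_threshold)

-- ===== LEMMAS AND PROOFS =====

theorem aFold_inv (thr : Int) : ∀ (t c : List (Int × Int × Int))
    (cs : List (List (Int × Int × Int))) (prev : Int × Int × Int),
    c.getLast? = some prev →
    (if (t.foldl (aClusterStep thr) (c, cs)).1.isEmpty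
      then (t.foldl (aClusterStep thr) (c, cs)).2
      else (t.foldl (aClusterStep thr) (c, cs)).2 ++ [(t.foldl (aClusterStep thr) (c, cs)).1])
    = cs ++ (c ++ (bTakeRun thr prev t).1) :: bClusters thr (bTakeRun thr prev t).2 := by
  intro t
  induction t with
  | nil =>
    intro c cs prev hc
    have hne : c ≠ [] := by rintro rfl; simp at hc
    simp [bTakeRun, bClusters, List.isEmpty_iff, hne]
  | cons h t ih =>
    intro c cs prev hc
    have hne : c ≠ [] := by rintro rfl; simp at hc
    have hstep : aClusterStep thr (c, cs) h =
        (if |h.2.1 - prev.2.1| < thr then (c ++ [h], cs) else ([h], cs ++ [c])) := by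
      simp [aClusterStep, List.isEmpty_iff, hne, PySem.List.pyGet?_neg_one, hc]
    simp only [List.foldl_cons, hstep]
    by_cases hcl : |h.2.1 - prev.2.1| < thr
    · rw [if_pos hcl]
      rw [ih (c ++ [h]) cs h (by simp)]
      simp [bTakeRun, hcl]
    · rw [if_neg hcl]
      rw [ih [h] (cs ++ [c]) h (by simp)]
      simp [bTakeRun, hcl, bClusters]

theorem clusters_eq (thr : Int) (items : List (Int × Int × Int)) :
    aRowClusters thr items = bClusters thr items := by
  cases items with
  | nil => simp [aRowClusters, bClusters]
  | cons h t =>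
    unfold aRowClusters
    simp only [List.foldl_cons]
    have hstep : aClusterStep thr ([], []) h = ([h], []) := by
      simp [aClusterStep]
    rw [hstep]
    rw [aFold_inv thr t [h] [] h (by simp)]
    simp [bClusters]

theorem mem_bClusters_ne_nil (thr : Int) (l : List (Int × Int × Int)) :
    ∀ cl ∈ bClusters thr l, cl ≠ [] := by
  induction l using bClusters.induct thr with
  | case1 => simp [bClusters]
  | case2 h t r ih =>
    intro cl hcl
    rw [bClusters] at hcl
    rcases List.mem_cons.mp hcl with rfl | hm
    · simp
    · exact ih cl hm

theorem place_eq (base_offset : Int) (lp : PySem.Dict Int (Int × Int))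
    (cl : List (Int × Int × Int)) (hne : cl ≠ []) :
    aPlace base_offset lp cl =
      (PySem.List.enumerate cl).foldl
        (fun lp e =>
          lp.insert e.2.1 (e.2.2.1, e.2.2.2 + base_offset + bExtra e.1 cl.length)) lp := by
  have h1 : 1 ≤ cl.length := List.length_pos_iff.mpr hne
  unfold aPlace
  congr 1
  funext lp e
  simp only [bExtra]
  rcases Nat.lt_or_ge 1 cl.length with h | h
  · have hc : (1 : Int) < (cl.length : Int) := by exact_mod_cast h
    have hne1 : ((cl.length : Int)) ≠ 1 := by omega
    rw [if_pos hc, if_neg hne1]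
  · have hc : cl.length = 1 := by omega
    rw [hc]
    norm_num

theorem rows_eq_aux (coords : List (Int × Int × Int)) :
    ∀ (people : List (List (String × Int))) (acc : List (Int × Int × Int))
      (d : PySem.Dict Int (List (Int × Int × Int))),
    ((people.foldl (fun pts p =>
      match (PySem.Dict.mk p).get? "id" with
      | none => pts
      | some pid =>
        if (PySem.Dict.mk coords).contains pid then
          match (PySem.Dict.mk coords).get? pid with
          | some xy => pts ++ [(pid, xy.1, xy.2)]
          | none => pts
        else pts) acc).foldl
        (fun rows q => rows.modify q.2.2 [] (· ++ [q])) d) =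
    (people.foldl (fun rows p =>
      match (PySem.Dict.mk p).get? "id" with
      | none => rows
      | some pid =>
        if (PySem.Dict.mk coords).contains pid then
          match (PySem.Dict.mk coords).get? pid with
          | some xy => rows.modify xy.2 [] (· ++ [(pid, xy.1, xy.2)])
          | none => rows
        else rows) (acc.foldl (fun rows q => rows.modify q.2.2 [] (· ++ [q])) d)) := by
  intro people
  induction people with
  | nil => intro acc d; rfl
  | cons p ps ih =>
    intro acc d
    simp only [List.foldl_cons]
    rw [ih]
    congr 1
    cases hid : (PySem.Dict.mk p).get? "id" with
    | none => rfl
    | some pid =>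
      simp only
      by_cases hct : (PySem.Dict.mk coords).contains pid
      · simp only [hct, if_true]
        cases hxy : (PySem.Dict.mk coords).get? pid with
        | none => rfl
        | some xy => simp [List.foldl_append]
      · simp [hct]

theorem rows_eq (people : List (List (String × Int))) (coords : List (Int × Int × Int)) :
    (people.foldl (fun rows p =>
      match (PySem.Dict.mk p).get? "id" with
      | none => rows
      | some pid =>
        if (PySem.Dict.mk coords).contains pid then
          match (PySem.Dict.mk coords).get? pid with
          | some xy => rows.modify xy.2 [] (· ++ [(pid, xy.1, xy.2)])
          | none => rows
        else rows) (PySem.Dict.empty : PySem.Dict Int (List (Int × Int × Int)))) =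
    ((people.foldl (fun pts p =>
      match (PySem.Dict.mk p).get? "id" with
      | none => pts
      | some pid =>
        if (PySem.Dict.mk coords).contains pid then
          match (PySem.Dict.mk coords).get? pid with
          | some xy => pts ++ [(pid, xy.1, xy.2)]
          | none => pts
        else pts) ([] : List (Int × Int × Int))).foldl
        (fun rows q => rows.modify q.2.2 [] (· ++ [q])) PySem.Dict.empty) := by
  rw [rows_eq_aux coords people [] PySem.Dict.empty]
  rfl

-- ===== VERDICT (by name: the statement is the Claim_ definition above) =====
theorem row_fold_eq (base_offset near_x_threshold : Int)
    (lp : PySem.Dict Int (Int × Int)) (items : List (Int × Int × Int)) :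
    (aRowClusters near_x_threshold (PySem.List.sorted items (fun t => t.2.1) false)).foldl
        (aPlace base_offset) lp =
    (bClusters near_x_threshold (PySem.List.sorted items (fun t => t.2.1) false)).foldl
        (fun lp cl =>
          let n : Int := cl.length
          (PySem.List.enumerate cl).foldl
            (fun lp e =>
              lp.insert e.2.1 (e.2.2.1, e.2.2.2 + base_offset + bExtra e.1 n)) lp) lp := by
  rw [clusters_eq]
  apply PySem.List.foldl_congr_mem
  intro lp' cl hcl
  have h := place_eq base_offset lp' cl
    (mem_bClusters_ne_nil near_x_threshold _ cl hcl)
  simpa using h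

theorem compute_label_positions_spec : Claim_equal_compute_label_positions := by
  intro people coords base_offset near_x_threshold _hdom _hpre
  unfold Spec_compute_label_positions compute_label_positions compute_label_positions_alt
  dsimp only
  rw [← rows_eq people coords]
  congr 1
  simp only [PySem.Dict.values, List.foldl_map]
  apply PySem.List.foldl_congr_mem
  intro lp row _
  exact row_fold_eq base_offset near_x_threshold lp row.2
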